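-- pv_equiv track=rewrite | github.com/finos/aigf-mcp-server | src/finos_mcp/application/services/search_text_service.py | best_match_index
-- ===== SOURCE A (Python) =====
-- _SEARCH_STOP_WORDS = {
--     "the",
--     "and",
--     "for",
--     "with",
--     "that",
--     "this",
--     "from",
--     "are",
--     "was",
--     "were",
--     "have",
--     "has",
--     "had",
--     "about",
--     "into",
--     "after",
--     "before",
--     "between",
--     "through",
-- }
--
-- def best_match_index(content: str, query: str) -> tuple[int, bool]:
--     """Return (char_index, is_exact_phrase) for the best match of query in content."""
--     lower = content.lower()
--
--     idx = lower.find(query.lower())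
--     if idx != -1:
--         return idx, True
--
--     tokens = sorted(
--         (
--             token
--             for token in query.lower().split()
--             if len(token) > 2 and token not in _SEARCH_STOP_WORDS
--         ),
--         key=len,
--         reverse=True,
--     )
--     for token in tokens:
--         idx = lower.find(token)
--         if idx != -1:
--             return idx, False
--
--     return -1, False
-- ===== SOURCE B (Python) =====
-- _SEARCH_STOP_WORDS = {
--     "the", "and", "for", "with", "that", "this", "from", "are", "was",
--     "were", "have", "has", "had", "about", "into", "after", "before",
--     "between", "through",
-- }
--
--
-- def best_match_index(content: str, query: str) -> tuple[int, bool]: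
--     """Return (char_index, is_exact_phrase) for the best match of query in content."""
--     lower = content.lower()
--     q = query.lower()
--
--     idx = lower.find(q)
--     if idx != -1:
--         return idx, True
--
--     hits = [
--         (len(token), lower.find(token))
--         for token in q.split()
--         if len(token) > 2 and token not in _SEARCH_STOP_WORDS and token in lower
--     ]
--     if not hits:
--         return -1, False
--     return max(hits, key=lambda p: p[0])[1], False
-- ===== Notes on version B (the rewrite author's own statement) =====
-- stated objective: alternative
-- what changed: The fallback no longer sorts the filtered tokens by length and scans them for the first match with early return: a comprehension collects (length, index) pairs for the filtered tokens that occur in the content, and a single max by length (Python's max keeps the first maximal pair, reproducing the stable descending sort's tie-break) picks the answer.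
import Mathlib
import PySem

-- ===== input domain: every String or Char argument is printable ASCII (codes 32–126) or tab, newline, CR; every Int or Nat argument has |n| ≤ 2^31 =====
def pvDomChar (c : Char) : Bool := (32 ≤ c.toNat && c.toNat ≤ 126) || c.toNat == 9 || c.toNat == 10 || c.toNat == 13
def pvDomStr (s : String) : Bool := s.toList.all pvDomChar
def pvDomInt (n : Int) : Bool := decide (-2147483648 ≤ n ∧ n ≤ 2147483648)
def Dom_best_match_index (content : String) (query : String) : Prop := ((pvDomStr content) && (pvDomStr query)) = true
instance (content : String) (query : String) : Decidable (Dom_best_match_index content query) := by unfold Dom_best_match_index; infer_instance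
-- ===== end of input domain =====

-- B replaces A's "sort filtered tokens by length descending, scan with early return" fallback by a
-- comprehension of (length, index) pairs for the filtered tokens occurring in the content followed by
-- one max by length (Python's max keeps the first maximal pair, the stable reverse sort's tie-break).

-- ===== PORT A =====
def pvStopWords : PySem.Set String := PySem.Set.ofList
  ["the","and","for","with","that","this","from","are","was","were","have","has","had",
   "about","into","after","before","between","through"]

-- the generator-expression filter: len(token) > 2 and token not in _SEARCH_STOP_WORDS
def bmiKeep (t : String) : Bool := decide (2 < PySem.Str.len t) && !(pvStopWords.contains t)

-- A's 'for token in tokens: idx = lower.find(token); if idx != -1: return idx, False' + final return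
def bmiLoopA (lower : String) : List String → Int × Bool
  | [] => (-1, false)
  | t :: rest =>
      let i := PySem.Str.find lower t
      if i ≠ -1 then (i, false) else bmiLoopA lower rest

def best_match_index (content : String) (query : String) : Int × Bool :=
  let lower := PySem.Str.lower content
  let idx := PySem.Str.find lower (PySem.Str.lower query)
  if idx ≠ -1 then (idx, true)
  else
    let tokens := PySem.List.sorted
      ((PySem.Str.split₀ (PySem.Str.lower query)).filter bmiKeep) PySem.Str.len true
    bmiLoopA lower tokens

-- ===== PORT B =====
def best_match_index_alt (content : String) (query : String) : Int × Bool :=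
  let lower := PySem.Str.lower content
  let q := PySem.Str.lower query
  let idx := PySem.Str.find lower q
  if idx ≠ -1 then (idx, true)
  else
    let hits := ((PySem.Str.split₀ q).filter
        (fun t => bmiKeep t && PySem.Str.isIn t lower)).map
        (fun t => (PySem.Str.len t, PySem.Str.find lower t))
    match PySem.List.max? hits (fun p => p.1) with
    | none => (-1, false)
    | some p => (p.2, false)

-- ===== PRECONDITION & SPEC =====
def Spec_best_match_index (content : String) (query : String) (out : Int × Bool) : Prop := out = best_match_index_alt content query
instance (content : String) (query : String) (out : Int × Bool) : Decidable (Spec_best_match_index content query out) := by unfold Spec_best_match_index; infer_instance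

-- ===== CLAIM (what is proved, stated in full; the proofs are below) =====
def Claim_equal_best_match_index : Prop := ∀ (content : String) (query : String), Dom_best_match_index content query → Spec_best_match_index content query (best_match_index content query)

-- ===== LEMMAS AND PROOFS =====

-- (first-match index, its token's length) over a token list; (-1, 0) if no token occurs in `lower`
def bmiFm (lower : String) : List String → Int × Int
  | [] => (-1, 0)
  | t :: r =>
      if PySem.Str.find lower t ≠ -1 then (PySem.Str.find lower t, PySem.Str.len t)
      else bmiFm lower r

-- one step of the "keep the strictly longest matching token" accumulator (on a filtered token)
def bmiStep (lower : String) (p : Int × Int) (t : String) : Int × Int :=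
  if p.2 < PySem.Str.len t ∧ PySem.Str.find lower t ≠ -1
  then (PySem.Str.find lower t, PySem.Str.len t) else p

-- bridge from max?'s Option accumulator ((len, idx) pairs) to bmiStep's (idx, len) accumulator
def bmiG : Option (Int × Int) → Int × Int
  | none => (-1, 0)
  | some p => (p.2, p.1)

theorem bmiLoopA_eq_fm (lower : String) (L : List String) :
    bmiLoopA lower L = ((bmiFm lower L).1, false) := by
  induction L with
  | nil => rfl
  | cons t r ih =>
      simp only [bmiLoopA, bmiFm]
      split_ifs <;> simp [ih]

theorem bmiFm_snd_le (lower : String) (L : List String) (c : Int) (h0 : 0 ≤ c)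
    (h : ∀ t ∈ L, PySem.Str.len t ≤ c) : (bmiFm lower L).2 ≤ c := by
  induction L with
  | nil => simpa [bmiFm] using h0
  | cons t r ih =>
      simp only [bmiFm]
      split_ifs
      · exact h t (by simp)
      · exact ih (fun x hx => h x (by simp [hx]))

theorem bmiLen_nonneg (t : String) : 0 ≤ PySem.Str.len t := by
  simp [PySem.Str.len_eq]

theorem bmiFm_insertBy (lower y : String) (hy : 0 < PySem.Str.len y) :
    ∀ (S : List String),
      S.Pairwise (fun a b => PySem.Str.len b ≤ PySem.Str.len a) →
      bmiFm lower
        (PySem.List.insertBy (fun a b => decide (PySem.Str.len b < PySem.Str.len a)) y S)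
        = bmiStep lower (bmiFm lower S) y := by
  intro S
  induction S with
  | nil =>
      intro _
      have hy' : 0 < y.length := by simpa [PySem.Str.len_eq] using hy
      by_cases hf : PySem.Chars.find lower.toList y.toList = -1
      · simp [PySem.List.insertBy, bmiFm, bmiStep, hf]
      · simp [PySem.List.insertBy, bmiFm, bmiStep, hf, hy']
  | cons s S' ih =>
      intro hp
      rcases List.pairwise_cons.1 hp with ⟨hps, hp'⟩
      by_cases hc : s.length < y.length
      · -- y is inserted at the front
        have hle : (bmiFm lower (s :: S')).2 ≤ PySem.Str.len s :=
          bmiFm_snd_le lower (s :: S') (PySem.Str.len s) (bmiLen_nonneg s)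
            (by intro t ht
                rcases List.mem_cons.1 ht with h | h
                · simp [h]
                · exact hps t h)
        have hlt : (bmiFm lower (s :: S')).2 < PySem.Str.len y := by
          have h2 : PySem.Str.len s < PySem.Str.len y := by
            simpa [PySem.Str.len_eq] using hc
          exact lt_of_le_of_lt hle h2
        have hins : PySem.List.insertBy
            (fun a b => decide (PySem.Str.len b < PySem.Str.len a)) y (s :: S')
            = y :: s :: S' := by
          simp [PySem.List.insertBy, PySem.Str.len_eq, hc]
        rw [hins]
        by_cases hf : PySem.Chars.find lower.toList y.toList = -1
        · simp [bmiFm, bmiStep, hf]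
        · have h1 : bmiFm lower (y :: s :: S')
              = (PySem.Str.find lower y, PySem.Str.len y) := by
            simp [bmiFm, hf]
          rw [h1]
          unfold bmiStep
          rw [if_pos ⟨hlt, by simpa using hf⟩]
      · -- y goes after s
        have hins : PySem.List.insertBy
            (fun a b => decide (PySem.Str.len b < PySem.Str.len a)) y (s :: S')
            = s :: PySem.List.insertBy
                (fun a b => decide (PySem.Str.len b < PySem.Str.len a)) y S' := by
          simp [PySem.List.insertBy, PySem.Str.len_eq, hc]
        rw [hins]
        by_cases hfs : PySem.Chars.find lower.toList s.toList = -1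
        · have h2 : bmiFm lower (s :: PySem.List.insertBy
              (fun a b => decide (PySem.Str.len b < PySem.Str.len a)) y S')
              = bmiFm lower (PySem.List.insertBy
                  (fun a b => decide (PySem.Str.len b < PySem.Str.len a)) y S') := by
            simp [bmiFm, hfs]
          have h3 : bmiFm lower (s :: S') = bmiFm lower S' := by
            simp [bmiFm, hfs]
          rw [h2, ih hp', h3]
        · simp [bmiFm, bmiStep, hfs, hc]

theorem bmiFm_sorted (lower : String) :
    ∀ (ys : List String), (∀ t ∈ ys, 0 < PySem.Str.len t) →
      bmiFm lower (PySem.List.sorted ys PySem.Str.len true)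
        = List.foldl (bmiStep lower) (-1, 0) ys := by
  intro ys
  induction ys using List.reverseRecOn with
  | nil => intro _; rfl
  | append_singleton ys y ih =>
      intro hpos
      have hys : ∀ t ∈ ys, 0 < PySem.Str.len t := fun t ht => hpos t (by simp [ht])
      have hy : 0 < PySem.Str.len y := hpos y (by simp)
      have hsnoc : PySem.List.sorted (ys ++ [y]) PySem.Str.len true
          = PySem.List.insertBy (fun a b => decide (PySem.Str.len b < PySem.Str.len a)) y
              (PySem.List.sorted ys PySem.Str.len true) := by
        rw [PySem.List.sorted_rev_eq_foldl_insertBy, PySem.List.sorted_rev_eq_foldl_insertBy,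
          List.foldl_append]
        rfl
      rw [hsnoc, bmiFm_insertBy lower y hy _ (PySem.List.sorted_pairwise_rev ys PySem.Str.len),
        ih hys, List.foldl_append]
      rfl

-- max? by first component is the strict-< running fold
theorem bmiMaxFold (L : List (Int × Int)) :
    PySem.List.max? L (fun p => p.1)
      = List.foldl (fun acc x => match acc with
          | none => some x
          | some m => if m.1 < x.1 then some x else some m) none L := by
  unfold PySem.List.max?
  congr 1
  funext acc x
  cases acc <;> rfl

-- folding the max?-step over a pair list, read back through bmiG and paired with False
theorem bmiMatch (f : Option (Int × Int) → (Int × Int) → Option (Int × Int))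
    (L : List (Int × Int)) :
    ((bmiG (List.foldl f none L)).1, false)
      = (match List.foldl f none L with
          | none => ((-1 : Int), false)
          | some p => (p.2, false)) := by
  cases List.foldl f none L <;> rfl

-- the strictly-longest fold equals max?-by-length over the (len, idx) pairs of the matching tokens
theorem bmiFoldl_eq_max (lower : String) :
    ∀ (ys : List String), (∀ t ∈ ys, 0 < PySem.Str.len t) →
      ∀ (o : Option (Int × Int)),
        List.foldl (bmiStep lower) (bmiG o) ys
          = bmiG (List.foldl
              (fun acc x => match acc with
                | none => some x
                | some m => if m.1 < x.1 then some x else some m)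
              o
              ((ys.filter (fun t => PySem.Str.isIn t lower)).map
                (fun t => (PySem.Str.len t, PySem.Str.find lower t)))) := by
  intro ys
  induction ys with
  | nil => intro _ o; rfl
  | cons t r ih =>
      intro hpos o
      have hr : ∀ x ∈ r, 0 < PySem.Str.len x := fun x hx => hpos x (by simp [hx])
      have ht : 0 < PySem.Str.len t := hpos t (by simp)
      by_cases hm : PySem.Str.isIn t lower = true
      · have hf : PySem.Str.find lower t ≠ -1 := by
          simp only [PySem.Str.find_eq]
          rw [PySem.Chars.find_ne_neg_one_iff, ← PySem.Chars.isIn_iff_infix]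
          simpa using hm
        rw [List.foldl_cons, List.filter_cons_of_pos (by simpa using hm), List.map_cons,
          List.foldl_cons]
        have hstep : bmiStep lower (bmiG o) t
            = bmiG (match o with
                | none => some (PySem.Str.len t, PySem.Str.find lower t)
                | some m => if m.1 < (PySem.Str.len t, PySem.Str.find lower t).1
                    then some (PySem.Str.len t, PySem.Str.find lower t) else some m) := by
          cases o with
          | none =>
              show bmiStep lower (-1, 0) t = _
              unfold bmiStep
              rw [if_pos ⟨ht, hf⟩]
              rfl
          | some m =>
              by_cases hlt : m.1 < PySem.Str.len t
              · show bmiStep lower (m.2, m.1) t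
                    = bmiG (if m.1 < (PySem.Str.len t, PySem.Str.find lower t).1
                        then some (PySem.Str.len t, PySem.Str.find lower t) else some m)
                unfold bmiStep
                rw [if_pos ⟨hlt, hf⟩, if_pos hlt]
                rfl
              · show bmiStep lower (m.2, m.1) t
                    = bmiG (if m.1 < (PySem.Str.len t, PySem.Str.find lower t).1
                        then some (PySem.Str.len t, PySem.Str.find lower t) else some m)
                unfold bmiStep
                rw [if_neg (fun hc => hlt hc.1), if_neg hlt]
                rfl
        rw [hstep]
        exact ih hr _
      · have hf : PySem.Str.find lower t = -1 := by
          simp only [PySem.Str.find_eq]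
          rw [PySem.Chars.find_eq_neg_one_iff, ← PySem.Chars.isIn_eq_false_iff]
          simpa using hm
        have hstep : bmiStep lower (bmiG o) t = bmiG o := by
          unfold bmiStep
          rw [if_neg (fun hc => hc.2 hf)]
        rw [List.foldl_cons, List.filter_cons_of_neg (by simpa using hm), hstep]
        exact ih hr o

-- ===== VERDICT (by name: the statement is the Claim_ definition above) =====
theorem best_match_index_spec : Claim_equal_best_match_index := by
  intro content query _
  unfold Spec_best_match_index best_match_index best_match_index_alt
  by_cases h : PySem.Chars.find (PySem.Chars.lower content.toList)
      (PySem.Chars.lower query.toList) = -1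
  · simp only [PySem.Str.find_eq, PySem.Str.lower]
    rw [if_neg (by simp [h]), if_neg (by simp [h])]
    set lower := String.ofList (PySem.Chars.lower content.toList) with hlo
    set F := (PySem.Str.split₀ (String.ofList (PySem.Chars.lower query.toList))).filter bmiKeep
      with hF
    have hpos : ∀ t ∈ F, 0 < PySem.Str.len t := by
      intro t htm
      have hh := (List.mem_filter.1 htm).2
      simp [bmiKeep] at hh
      simp [PySem.Str.len_eq]
      omega
    have hfilter :
        ((PySem.Str.split₀ (String.ofList (PySem.Chars.lower query.toList))).filter
          (fun t => bmiKeep t && PySem.Str.isIn t lower))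
          = F.filter (fun t => PySem.Str.isIn t lower) := by
      rw [hF, List.filter_filter]
      exact List.filter_congr (fun a _ => Bool.and_comm _ _)
    clear_value lower F
    rw [bmiLoopA_eq_fm, bmiFm_sorted lower F hpos]
    have hmain := bmiFoldl_eq_max lower F hpos none
    rw [show bmiG none = ((-1 : Int), (0 : Int)) from rfl] at hmain
    simp only [PySem.Str.find_eq] at hmain
    rw [hmain, hfilter, bmiMaxFold]
    exact bmiMatch _ _
  · simp [h]
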